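-- pv_equiv track=rewrite | github.com/Techcable/zsh2xonsh | src/zsh2xonsh/runtime/__init__.py | quote_into_shell_string
-- ===== SOURCE A (Python) =====
-- _NAUGHTY_CHARS = {"\\", "'"}
--
-- def quote_into_shell_string(s):
--     res = ["'"]
--     for c in s:
--         if c in _NAUGHTY_CHARS:
--             res.extend(("\\", c))
--         else:
--             res.append(c)
--     res.append("'")
--     return "".join(res)
-- ===== SOURCE B (Python) =====
-- def quote_into_shell_string(s):
--     return "'" + s.replace("\\", "\\\\").replace("'", "\\'") + "'"
-- ===== Notes on version B (the rewrite author's own statement) =====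
-- stated objective: idiomatic
-- what changed: Replaces the explicit per-character loop with list accumulator and join by two chained str.replace calls (backslash first, then quote) plus concatenation.
import Mathlib
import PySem

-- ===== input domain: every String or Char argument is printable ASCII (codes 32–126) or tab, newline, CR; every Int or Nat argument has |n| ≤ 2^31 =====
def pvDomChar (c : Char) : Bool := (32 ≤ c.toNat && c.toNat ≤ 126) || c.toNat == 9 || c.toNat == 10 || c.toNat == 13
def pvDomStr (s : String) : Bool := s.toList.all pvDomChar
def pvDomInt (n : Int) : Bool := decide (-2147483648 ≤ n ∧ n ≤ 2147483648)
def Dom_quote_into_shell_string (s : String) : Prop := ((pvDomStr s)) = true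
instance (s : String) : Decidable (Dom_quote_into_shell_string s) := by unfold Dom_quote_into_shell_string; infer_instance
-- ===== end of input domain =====

-- B replaces A's per-character loop+join by two chained str.replace calls (idiomatic; same cost).


-- ===== PORT A =====
def pvNaughtyChars : PySem.Set String := PySem.Set.ofList ["\\", "'"]

def quote_into_shell_string (s : String) : String :=
  let res := s.toList.foldl
    (fun (res : List String) c =>
      if String.ofList [c] ∈ pvNaughtyChars then res ++ ["\\", String.ofList [c]]
      else res ++ [String.ofList [c]]) ["'"]
  PySem.Str.join "" (res ++ ["'"])

-- ===== PORT B =====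
def quote_into_shell_string_alt (s : String) : String :=
  "'" ++ PySem.Str.replace (PySem.Str.replace s "\\" "\\\\") "'" "\\'" ++ "'"

-- ===== PRECONDITION & SPEC =====
def Spec_quote_into_shell_string (s : String) (out : String) : Prop := out = quote_into_shell_string_alt s
instance (s : String) (out : String) : Decidable (Spec_quote_into_shell_string s out) := by unfold Spec_quote_into_shell_string; infer_instance

-- ===== CLAIM (what is proved, stated in full; the proofs are below) =====
def Claim_equal_quote_into_shell_string : Prop := ∀ (s : String), Dom_quote_into_shell_string s → Spec_quote_into_shell_string s (quote_into_shell_string s)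

-- ===== LEMMAS AND PROOFS =====

-- replace's worker with a single-char pattern is a per-character flatMap
theorem go_single (a : Char) (new : List Char) :
    ∀ (fuel : Nat) (l acc : List Char), l.length ≤ fuel →
      PySem.Chars.replace.go [a] new fuel l acc
        = acc.reverse ++ l.flatMap (fun c => if c = a then new else [c]) := by
  intro fuel
  induction fuel with
  | zero =>
    intro l acc h
    have : l = [] := List.eq_nil_of_length_eq_zero (Nat.le_zero.mp h)
    subst this
    simp [PySem.Chars.replace.go]
  | succ n ih =>
    intro l acc h
    cases l with
    | nil => simp [PySem.Chars.replace.go]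
    | cons c t =>
      simp only [PySem.Chars.replace.go]
      by_cases hc : c = a
      · subst hc
        have hp : List.isPrefixOf [c] (c :: t) = true := by
          simp [List.isPrefixOf]
        rw [if_pos hp]
        simp only [List.length_cons, List.length_nil, List.drop_succ_cons, List.drop_zero]
        rw [ih t (new.reverse ++ acc) (by simpa using Nat.le_of_succ_le_succ h)]
        simp
      · have hp : List.isPrefixOf [a] (c :: t) = false := by
          simp only [List.isPrefixOf, Bool.and_eq_false_iff]
          left
          exact beq_eq_false_iff_ne.mpr (fun h' => hc h'.symm)
        rw [if_neg (by simp [hp])]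
        rw [ih t (c :: acc) (by simpa using Nat.le_of_succ_le_succ h)]
        simp [hc]

theorem replace_single (cs : List Char) (a : Char) (new : List Char) :
    PySem.Chars.replace cs [a] new = cs.flatMap (fun c => if c = a then new else [c]) := by
  simp only [PySem.Chars.replace, List.isEmpty]
  rw [go_single a new cs.length cs [] (le_refl _)]
  simp

-- the escaped body: one pass of A equals the two chained single-char replaces of B
theorem core (cs : List Char) :
    (List.map String.toList (cs.flatMap
        (fun c => if c = '\\' ∨ c = '\'' then ["\\", String.ofList [c]] else [String.ofList [c]]))).flatten
      = ((cs.flatMap (fun c => if c = '\\' then ['\\', '\\'] else [c])).flatMap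
          (fun c => if c = '\'' then ['\\', '\''] else [c])) := by
  induction cs with
  | nil => rfl
  | cons c t ih =>
    simp only [List.flatMap_cons, List.map_append, List.flatten_append, List.flatMap_append, ih]
    congr 1
    by_cases h1 : c = '\\'
    · subst h1; decide
    · by_cases h2 : c = '\''
      · subst h2; decide
      · simp [h1, h2]

theorem intercalate_nil_eq_flatten (l : List (List Char)) :
    List.intercalate ([] : List Char) l = l.flatten := by
  induction l with
  | nil => rfl
  | cons a t ih =>
    cases t with
    | nil => simp [List.intercalate]
    | cons b u =>
      simp only [List.intercalate, List.intersperse] at *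
      simp_all

theorem quote_eq (s : String) :
    quote_into_shell_string s = quote_into_shell_string_alt s := by
  apply String.ext
  simp only [quote_into_shell_string, quote_into_shell_string_alt]
  have hsep : ("" : String).toList = [] := by decide
  have hq : ("'" : String).toList = ['\''] := by decide
  have hb : ("\\" : String).toList = ['\\'] := by decide
  have hbb : ("\\\\" : String).toList = ['\\', '\\'] := by decide
  have hbq : ("\\'" : String).toList = ['\\', '\''] := by decide
  have hfun : (fun (res : List String) c =>
      if String.ofList [c] ∈ pvNaughtyChars then res ++ ["\\", String.ofList [c]]
      else res ++ [String.ofList [c]])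
      = (fun (res : List String) c => res ++
          (if c = '\\' ∨ c = '\'' then ["\\", String.ofList [c]] else [String.ofList [c]])) := by
    funext res c
    by_cases h : c = '\\' ∨ c = '\''
    · rw [if_pos h, if_pos]
      rcases h with h | h <;> subst h <;> decide
    · rw [if_neg h, if_neg]
      simp only [pvNaughtyChars, PySem.Set.mem_ofList, List.mem_cons,
        List.not_mem_nil, or_false]
      rintro (hm | hm)
      · apply h; left
        have := congrArg String.toList hm
        rw [String.toList_ofList, hb] at this
        simpa using this
      · apply h; right
        have := congrArg String.toList hm
        rw [String.toList_ofList, hq] at this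
        simpa using this
  rw [hfun, PySem.List.foldl_append_eq_flatMap]
  simp only [PySem.Str.toList_join, PySem.Chars.join, String.toList_append,
    PySem.Str.replace, String.toList_ofList, hsep, hq, hb, hbb, hbq,
    intercalate_nil_eq_flatten]
  rw [replace_single, replace_single]
  simp only [List.map_cons, List.map_append, List.flatten_cons, List.flatten_append,
    core]
  simp [hq]

-- ===== VERDICT (by name: the statement is the Claim_ definition above) =====
theorem quote_into_shell_string_spec : Claim_equal_quote_into_shell_string := by
  intro s _
  exact quote_eq s
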